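-- pv_equiv track=rewrite | github.com/Kuhlman-Lab/RosettaFold2 | input_prep/query_utils.py | detect_duplicate_queries
-- ===== SOURCE A (Python) =====
-- from typing import Sequence, Tuple, Union
--
-- CleanQuery = Tuple[str, Sequence[str]]
--
-- def detect_duplicate_queries(
--         query_list: Sequence[CleanQuery]) -> Sequence[CleanQuery]:
--     """
--     Detects duplicate queries from query list. If a same query comes from
--     two different sources, it is considered a duplicate.
--     """
--     clean_query_list = []
--
--     for query in query_list:
--         # If the clean_query_list is empty, query is not a dupe.
--         if len(clean_query_list) == 0:
--             clean_query_list.append(query)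
--         else:
--             dupe = False
--
--             # If the sequences of the queries are the same, then its a dupe.
--             for old_query in clean_query_list:
--                 if old_query[1] == query[1]:
--                     dupe = True
--
--             if dupe == False:
--                 clean_query_list.append(query)
--
--     # Sort the clean_query_list such that monomer queries appear first.
--     clean_query_list = sorted(clean_query_list, key=lambda x: len(x[1]))
--
--     return clean_query_list
-- ===== SOURCE B (Python) =====
-- def detect_duplicate_queries(query_list):
--     """Select-and-filter dedup: repeatedly take the front query and discard
--     every later query with the same sequence from the remaining work list,
--     then sort the survivors by sequence length (stable)."""
--     remaining = list(query_list)
--     unique = []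
--     while remaining:
--         head = remaining[0]
--         unique.append(head)
--         remaining = [q for q in remaining[1:] if q[1] != head[1]]
--     return sorted(unique, key=lambda x: len(x[1]))
-- ===== Notes on version B (the rewrite author's own statement) =====
-- stated objective: alternative
-- what changed: Replaces A's accumulator-with-dupe-flag scheme (for each query, rescan the whole kept list to set a flag) with a select-and-filter dedup that never inspects the kept list: take the front query, then physically remove all later queries sharing its sequence from the work list, repeating until the work list is empty; survivors are then length-sorted as in A.
import Mathlib
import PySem

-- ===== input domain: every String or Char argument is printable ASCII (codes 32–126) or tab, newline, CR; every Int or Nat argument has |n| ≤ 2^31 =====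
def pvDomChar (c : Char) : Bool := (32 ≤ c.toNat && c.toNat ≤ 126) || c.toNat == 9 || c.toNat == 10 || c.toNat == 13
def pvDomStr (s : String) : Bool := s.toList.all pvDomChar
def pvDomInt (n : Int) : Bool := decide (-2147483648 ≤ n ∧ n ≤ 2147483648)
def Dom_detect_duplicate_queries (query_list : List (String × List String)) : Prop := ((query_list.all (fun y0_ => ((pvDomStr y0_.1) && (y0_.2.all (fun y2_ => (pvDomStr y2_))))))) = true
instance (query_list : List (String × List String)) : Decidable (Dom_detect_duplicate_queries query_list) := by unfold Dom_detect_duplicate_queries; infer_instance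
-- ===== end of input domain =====

-- B dedups by select-and-filter (take the front query, delete its later duplicates
-- from the work list, repeat) instead of A's per-query rescan of the kept list with a
-- dupe flag; the survivors are length-sorted as in A (objective: alternative).


-- ===== PORT A =====
-- outer loop: empty-list fast path, else inner loop over the kept list sets a dupe flag,
-- append if the flag stayed false
def detect_duplicate_queries_loopA (query_list : List (String × List String)) :
    List (String × List String) :=
  query_list.foldl (fun clean_query_list query =>
    if clean_query_list.length = 0 then
      clean_query_list ++ [query]
    else
      let dupe := clean_query_list.foldl
        (fun dupe old_query => if old_query.2 == query.2 then true else dupe) false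
      if dupe = false then clean_query_list ++ [query] else clean_query_list) []

def detect_duplicate_queries (query_list : List (String × List String)) :
    List (String × List String) :=
  PySem.List.sorted (detect_duplicate_queries_loopA query_list) (fun x => x.2.length) false

-- ===== PORT B =====
-- select-and-filter: keep the front query, drop every later query with the same
-- sequence from the work list, repeat until the work list is empty
def detect_duplicate_queries_select (remaining : List (String × List String)) :
    List (String × List String) :=
  match remaining with
  | [] => []
  | head :: rest =>
      head :: detect_duplicate_queries_select (rest.filter (fun q => q.2 != head.2))
termination_by remaining.length
decreasing_by
  simpa using Nat.lt_succ_of_le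
    (le_trans (List.length_filter_le _ _) (le_of_eq List.length_attach))

def detect_duplicate_queries_alt (query_list : List (String × List String)) :
    List (String × List String) :=
  PySem.List.sorted (detect_duplicate_queries_select query_list) (fun x => x.2.length) false

-- ===== PRECONDITION & SPEC =====
def Spec_detect_duplicate_queries (query_list : List (String × List String)) (out : List (String × List String)) : Prop := out = detect_duplicate_queries_alt query_list
instance (query_list : List (String × List String)) (out : List (String × List String)) : Decidable (Spec_detect_duplicate_queries query_list out) := by unfold Spec_detect_duplicate_queries; infer_instance

-- ===== CLAIM (what is proved, stated in full; the proofs are below) =====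
def Claim_equal_detect_duplicate_queries : Prop := ∀ (query_list : List (String × List String)), Dom_detect_duplicate_queries query_list → Spec_detect_duplicate_queries query_list (detect_duplicate_queries query_list)

-- ===== LEMMAS AND PROOFS =====

-- equation lemmas for the well-founded select-and-filter recursion
theorem select_nil : detect_duplicate_queries_select [] = [] := by
  unfold detect_duplicate_queries_select
  rfl

theorem select_cons (head : String × List String) (rest : List (String × List String)) :
    detect_duplicate_queries_select (head :: rest)
      = head :: detect_duplicate_queries_select (rest.filter (fun q => q.2 != head.2)) := by
  conv_lhs => rw [detect_duplicate_queries_select]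

-- A's dupe-flag inner loop is an `any` over the kept list
theorem dupe_foldl_eq_any (q : String × List String)
    (acc : List (String × List String)) (b : Bool) :
    acc.foldl (fun dupe old_query => if old_query.2 == q.2 then true else dupe) b
      = (b || acc.any (fun old_query => old_query.2 == q.2)) := by
  induction acc generalizing b with
  | nil => simp
  | cons x xs ih =>
    rw [List.foldl_cons, List.any_cons]
    by_cases hx : x.2 == q.2
    · rw [if_pos hx, ih]; simp [hx]
    · rw [if_neg hx, ih]
      rcases b with _ | _ <;> simp [Bool.eq_false_iff.mpr hx]

-- main invariant: A's fold from acc equals acc followed by B's select-and-filter on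
-- the suffix with the sequences already kept in acc filtered out up front
theorem loop_invariant (l acc : List (String × List String)) :
    l.foldl (fun clean_query_list query =>
      if clean_query_list.length = 0 then
        clean_query_list ++ [query]
      else
        let dupe := clean_query_list.foldl
          (fun dupe old_query => if old_query.2 == query.2 then true else dupe) false
        if dupe = false then clean_query_list ++ [query] else clean_query_list) acc
    = acc ++ detect_duplicate_queries_select
        (l.filter (fun q => !acc.any (fun r => r.2 == q.2))) := by
  induction l generalizing acc with
  | nil => simp [select_nil]
  | cons q l ih =>
    simp only [List.foldl_cons, List.filter_cons]
    by_cases h : acc.any (fun r => r.2 == q.2) = true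
    · -- q is a dupe of something in acc: A skips it, B's filter drops it
      have hne : acc.length ≠ 0 := by rcases acc with _ | _ <;> simp_all
      have hstepA :
          (if acc.length = 0 then acc ++ [q]
           else
             let dupe := acc.foldl (fun dupe old_query =>
                if old_query.2 == q.2 then true else dupe) false
             if dupe = false then acc ++ [q] else acc) = acc := by
        rw [if_neg hne]
        simp only [dupe_foldl_eq_any, Bool.false_or, h, Bool.true_eq_false, if_false]
      rw [hstepA]
      simpa [h] using ih acc
    · -- q is fresh: A appends it, B selects it and filters its dupes out of the tail
      have hb : acc.any (fun r => r.2 == q.2) = false := Bool.eq_false_iff.mpr h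
      have hstepA :
          (if acc.length = 0 then acc ++ [q]
           else
             let dupe := acc.foldl (fun dupe old_query =>
                if old_query.2 == q.2 then true else dupe) false
             if dupe = false then acc ++ [q] else acc) = acc ++ [q] := by
        simp only [dupe_foldl_eq_any, Bool.false_or, hb]
        split_ifs <;> rfl
      rw [hstepA, ih (acc ++ [q])]
      have hfilter :
          l.filter (fun r => !(acc ++ [q]).any (fun s => s.2 == r.2))
            = (l.filter (fun r => !acc.any (fun s => s.2 == r.2))).filter
                (fun r => r.2 != q.2) := by
        rw [List.filter_filter]
        apply List.filter_congr
        intro r _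
        simp only [List.any_append, List.any_cons, List.any_nil, Bool.or_false,
          Bool.not_or, bne, Bool.and_comm]
        rw [BEq.comm]
      simp only [hb, Bool.not_false, if_pos]
      rw [select_cons, List.append_assoc, hfilter]
      rfl
-- ===== VERDICT (by name: the statement is the Claim_ definition above) =====
theorem detect_duplicate_queries_spec : Claim_equal_detect_duplicate_queries := by
  intro query_list _
  unfold Spec_detect_duplicate_queries detect_duplicate_queries detect_duplicate_queries_alt
  congr 1
  have := loop_invariant query_list []
  simpa [detect_duplicate_queries_loopA] using this
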